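-- pv_equiv track=rewrite | github.com/wolf257/L3_lingCorpus_CorpusAnalysis | code_source/modules/statistiques.py | lettersDistribution_dict_from_list
-- ===== SOURCE A (Python) =====
-- from collections import OrderedDict
--
-- def lettersDistribution_dict_from_list(list_word):
--     ''' Return dict lettersDistribution from a list '''
--
--     lettersDistribution = {}
--
--     for word in list_word :
--         for letter in word :
--             if letter not in lettersDistribution:
--                 lettersDistribution[letter] = 1
--             else :
--                 lettersDistribution[letter] +=1
--
--     #Retourne le dict sans ordre
--     #return lettersDistribution
--     return OrderedDict(sorted(lettersDistribution.items(), key=lambda t:t[0]))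
-- ===== SOURCE B (Python) =====
-- from collections import OrderedDict
--
-- def lettersDistribution_dict_from_list(list_word):
--     ''' Return dict lettersDistribution from a list '''
--     chars = sorted(letter for word in list_word for letter in word)
--     result = OrderedDict()
--     i = 0
--     n = len(chars)
--     while i < n:
--         j = i
--         while j < n and chars[j] == chars[i]:
--             j += 1
--         result[chars[i]] = j - i
--         i = j
--     return result
-- ===== Notes on version B (the rewrite author's own statement) =====
-- stated objective: alternative
-- what changed: Instead of hash-counting letters in a dict and then sorting the distinct keys, B sorts the whole character stream once and emits (letter, run-length) pairs by scanning consecutive runs of the sorted sequence.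
import Mathlib
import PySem

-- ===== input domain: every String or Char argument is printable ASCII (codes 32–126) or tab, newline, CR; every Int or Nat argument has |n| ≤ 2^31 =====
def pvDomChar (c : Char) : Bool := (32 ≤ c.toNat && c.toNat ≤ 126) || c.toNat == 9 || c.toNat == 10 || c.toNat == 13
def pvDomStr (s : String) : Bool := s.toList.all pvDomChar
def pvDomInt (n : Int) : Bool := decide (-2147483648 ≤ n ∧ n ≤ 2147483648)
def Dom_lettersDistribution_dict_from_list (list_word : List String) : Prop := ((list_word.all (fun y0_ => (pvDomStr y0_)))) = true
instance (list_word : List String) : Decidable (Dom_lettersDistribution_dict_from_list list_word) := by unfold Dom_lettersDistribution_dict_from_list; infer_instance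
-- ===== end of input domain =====

-- B replaces A's hash-count-then-sort-keys by sort-all-characters-then-scan-runs; an
-- alternative decomposition of the same cost (not claimed faster).

-- ===== PORT A =====
-- A: count letters in a dict (insert 1 on first sight, else +1), then sort the items by key.
def lettersDistribution_dict_from_list (list_word : List String) : List (String × Int) :=
  let d : PySem.Dict String Int :=
    list_word.foldl (fun d word =>
      word.toList.foldl (fun d c =>
        let letter := String.singleton c
        if !d.contains letter then d.insert letter 1
        else d.insert letter (d.getD letter 0 + 1)) d)
      PySem.Dict.empty
  PySem.List.sorted d.items (fun t => t.1) false

-- ===== PORT B =====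
-- B's run scan (the two-index while loop): emit (head, length of the run of the head),
-- continue after the run.
def pvRuns : List String → List (String × Int)
  | [] => []
  | x :: xs =>
      (x, 1 + ((xs.takeWhile (· == x)).length : Int)) :: pvRuns (xs.dropWhile (· == x))
  termination_by l => l.length
  decreasing_by
    simpa using Nat.lt_succ_of_le (List.length_dropWhile_le _ _)

def lettersDistribution_dict_from_list_alt (list_word : List String) : List (String × Int) :=
  pvRuns (PySem.List.sorted
    (list_word.flatMap (fun word => word.toList.map (fun c => String.singleton c)))
    (fun x => x) false)

-- ===== PRECONDITION & SPEC =====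
def Spec_lettersDistribution_dict_from_list (list_word : List String) (out : List (String × Int)) : Prop := out = lettersDistribution_dict_from_list_alt list_word
instance (list_word : List String) (out : List (String × Int)) : Decidable (Spec_lettersDistribution_dict_from_list list_word out) := by unfold Spec_lettersDistribution_dict_from_list; infer_instance

-- ===== CLAIM (what is proved, stated in full; the proofs are below) =====
def Claim_equal_lettersDistribution_dict_from_list : Prop := ∀ (list_word : List String), Dom_lettersDistribution_dict_from_list list_word → Spec_lettersDistribution_dict_from_list list_word (lettersDistribution_dict_from_list list_word)

-- ===== LEMMAS AND PROOFS =====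

-- the character stream both programs consume
def pvChars (list_word : List String) : List String :=
  list_word.flatMap (fun word => word.toList.map (fun c => String.singleton c))

-- A's branchy update equals the unconditional counting update
lemma pvStep_eq : (fun (d : PySem.Dict String Int) (letter : String) =>
      if !d.contains letter then d.insert letter 1
      else d.insert letter (d.getD letter 0 + 1))
    = fun d letter => d.insert letter (d.getD letter 0 + 1) := by
  funext d letter
  by_cases h : d.contains letter = true
  · simp [h]
  · simp only [Bool.not_eq_true] at h
    have h0 : d.getD letter 0 = 0 := PySem.Dict.getD_of_not_contains d 0 h
    simp [h, h0]

-- A's dict is Counter(chars)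
lemma pvA_dict_eq (list_word : List String) :
    (list_word.foldl (fun d word =>
      word.toList.foldl (fun d c =>
        let letter := String.singleton c
        if !d.contains letter then d.insert letter 1
        else d.insert letter (d.getD letter 0 + 1)) d)
      PySem.Dict.empty) = PySem.Dict.counter (pvChars list_word) := by
  have h1 : ∀ (word : String) (d : PySem.Dict String Int),
      word.toList.foldl (fun d c =>
        let letter := String.singleton c
        if !d.contains letter then d.insert letter 1
        else d.insert letter (d.getD letter 0 + 1)) d
      = (word.toList.map (fun c => String.singleton c)).foldl
          (fun d x => d.insert x (d.getD x 0 + 1)) d := by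
    intro word d
    rw [List.foldl_map]
    have hf : (fun (d : PySem.Dict String Int) (c : Char) =>
        let letter := String.singleton c
        if !d.contains letter then d.insert letter 1
        else d.insert letter (d.getD letter 0 + 1))
      = fun d c => d.insert (String.singleton c)
          (d.getD (String.singleton c) 0 + 1) := by
      funext d c
      exact congrFun (congrFun pvStep_eq d) (String.singleton c)
    rw [hf]
  simp only [h1]
  rw [← PySem.Dict.foldl_insert_getD_add_one_eq_counter, pvChars, List.foldl_flatMap]

-- every element of dropWhile (== x) of a sorted list whose elements dominate x is > x
lemma pvLt_dropWhile (x : String) :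
    ∀ (l : List String), l.Pairwise (· ≤ ·) → (∀ y ∈ l, x ≤ y) →
      ∀ z ∈ l.dropWhile (· == x), x < z := by
  intro l
  induction l with
  | nil => simp
  | cons y ys ih =>
    intro hp hdom z hz
    by_cases hy : (y == x) = true
    · rw [List.dropWhile_cons_of_pos (by simpa using hy)] at hz
      exact ih (List.pairwise_cons.mp hp).2
        (fun w hw => hdom w (List.mem_cons_of_mem _ hw)) z hz
    · rw [List.dropWhile_cons_of_neg (by simpa using hy)] at hz
      have hxy : x < y := lt_of_le_of_ne (hdom y (List.mem_cons_self))
        (fun h => hy (by simp [h.symm]))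
      rcases List.mem_cons.mp hz with h | h
      · exact h ▸ hxy
      · exact lt_of_lt_of_le hxy ((List.pairwise_cons.mp hp).1 z h)

-- each pair of pvRuns on a sorted list: key occurs, value is its count
lemma pvRuns_mem (s : List String) (hs : s.Pairwise (· ≤ ·)) :
    ∀ p ∈ pvRuns s, p.1 ∈ s ∧ p.2 = (s.count p.1 : Int) := by
  induction s using pvRuns.induct with
  | case1 => simp [pvRuns]
  | case2 x xs ih =>
    intro p hp
    have hxle : ∀ y ∈ xs, x ≤ y := (List.pairwise_cons.mp hs).1
    have hxs : xs.Pairwise (· ≤ ·) := (List.pairwise_cons.mp hs).2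
    have htake : ∀ z ∈ xs.takeWhile (· == x), z = x := by
      intro z hz
      simpa using List.mem_takeWhile_imp hz
    have hdrop : ∀ z ∈ xs.dropWhile (· == x), x < z := pvLt_dropWhile x xs hxs hxle
    have hdp : (xs.dropWhile (· == x)).Pairwise (· ≤ ·) :=
      hxs.sublist (List.dropWhile_sublist _)
    have hsplit : xs.takeWhile (· == x) ++ xs.dropWhile (· == x) = xs :=
      List.takeWhile_append_dropWhile
    rw [pvRuns] at hp
    rcases List.mem_cons.mp hp with h | h
    · subst h
      refine ⟨List.mem_cons_self, ?_⟩
      have hct : (xs.takeWhile (· == x)).count x = (xs.takeWhile (· == x)).length :=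
        List.count_eq_length.mpr (fun b hb => by simp [htake b hb])
      have hcd : (xs.dropWhile (· == x)).count x = 0 :=
        List.count_eq_zero.mpr (fun hx => lt_irrefl x (hdrop x hx))
      have hxc : xs.count x = (xs.takeWhile (· == x)).length := by
        conv_lhs => rw [← hsplit]
        rw [List.count_append, hct, hcd]
        omega
      have : (x :: xs).count x = (xs.takeWhile (· == x)).length + 1 := by
        rw [List.count_cons_self, hxc]
      rw [this]
      push_cast
      ring
    · obtain ⟨h1, h2⟩ := ih hdp p h
      have hne : p.1 ≠ x := fun he => lt_irrefl x (he ▸ hdrop p.1 h1)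
      refine ⟨List.mem_cons_of_mem _ ((List.dropWhile_sublist _).subset h1), ?_⟩
      have hct : (xs.takeWhile (· == x)).count p.1 = 0 :=
        List.count_eq_zero.mpr (fun hx => hne (htake p.1 hx))
      have hc1 : (x :: xs).count p.1 = xs.count p.1 := by
        rw [List.count_cons]
        simp [hne.symm]
      have hc2 : xs.count p.1 = (xs.dropWhile (· == x)).count p.1 := by
        conv_lhs => rw [← hsplit]
        rw [List.count_append, hct]
        omega
      rw [hc1, hc2]
      exact h2

-- every element of the sorted list appears as a key of pvRuns
lemma pvRuns_surj (s : List String) (hs : s.Pairwise (· ≤ ·)) :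
    ∀ k ∈ s, k ∈ (pvRuns s).map Prod.fst := by
  induction s using pvRuns.induct with
  | case1 => simp
  | case2 x xs ih =>
    intro k hk
    have hxs : xs.Pairwise (· ≤ ·) := (List.pairwise_cons.mp hs).2
    have htake : ∀ z ∈ xs.takeWhile (· == x), z = x := by
      intro z hz
      simpa using List.mem_takeWhile_imp hz
    have hdp : (xs.dropWhile (· == x)).Pairwise (· ≤ ·) :=
      hxs.sublist (List.dropWhile_sublist _)
    have hsplit : xs.takeWhile (· == x) ++ xs.dropWhile (· == x) = xs :=
      List.takeWhile_append_dropWhile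
    rw [pvRuns]
    rcases List.mem_cons.mp hk with h | h
    · simp [h]
    · rw [← hsplit] at h
      rcases List.mem_append.mp h with h | h
      · simp [htake k h]
      · simp only [List.map_cons, List.mem_cons]
        exact Or.inr (ih hdp k h)

-- keys of pvRuns are strictly increasing
lemma pvRuns_pairwise (s : List String) (hs : s.Pairwise (· ≤ ·)) :
    (pvRuns s).Pairwise (fun a b => a.1 < b.1) := by
  induction s using pvRuns.induct with
  | case1 => simp [pvRuns]
  | case2 x xs ih =>
    have hxle : ∀ y ∈ xs, x ≤ y := (List.pairwise_cons.mp hs).1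
    have hxs : xs.Pairwise (· ≤ ·) := (List.pairwise_cons.mp hs).2
    have hdrop : ∀ z ∈ xs.dropWhile (· == x), x < z := pvLt_dropWhile x xs hxs hxle
    have hdp : (xs.dropWhile (· == x)).Pairwise (· ≤ ·) :=
      hxs.sublist (List.dropWhile_sublist _)
    rw [pvRuns]
    refine List.pairwise_cons.mpr ⟨?_, ih hdp⟩
    intro q hq
    exact hdrop q.1 (pvRuns_mem _ hdp q hq).1


-- ===== VERDICT (by name: the statement is the Claim_ definition above) =====
theorem lettersDistribution_dict_from_list_spec : Claim_equal_lettersDistribution_dict_from_list := by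
  intro lw _
  unfold Spec_lettersDistribution_dict_from_list lettersDistribution_dict_from_list
    lettersDistribution_dict_from_list_alt
  simp only [pvA_dict_eq, PySem.Dict.items_counter]
  set chars := pvChars lw with hchars
  set f : String → String × Int := fun k => (k, (chars.count k : Int)) with hf
  set s : List String := PySem.List.sorted chars (fun x => x) false with hsdef
  have hschars : s = PySem.List.sorted
      (lw.flatMap (fun word => word.toList.map (fun c => String.singleton c)))
      (fun x => x) false := by rw [hsdef, hchars, pvChars]
  rw [← hschars]
  have hs : s.Pairwise (· ≤ ·) := PySem.List.sorted_pairwise chars (fun x => x)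
  have hsperm : s.Perm chars := PySem.List.sorted_perm chars (fun x => x) false
  have hcnt : ∀ k, s.count k = chars.count k := fun k => hsperm.count_eq k
  set ys := pvRuns s with hys
  have hfstpw : (ys.map Prod.fst).Pairwise (· < ·) :=
    (pvRuns_pairwise s hs).map Prod.fst (fun a b h => h)
  have hnd : (ys.map Prod.fst).Nodup := hfstpw.imp ne_of_lt
  have hmem : ∀ k, k ∈ ys.map Prod.fst ↔ k ∈ PySem.Set.ofList chars := by
    intro k
    constructor
    · intro hk
      obtain ⟨p, hp, hpk⟩ := List.mem_map.mp hk
      have := (pvRuns_mem s hs p hp).1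
      rw [hpk] at this
      exact (PySem.Set.mem_ofList chars k).mpr (hsperm.mem_iff.mp this)
    · intro hk
      exact pvRuns_surj s hs k (hsperm.mem_iff.mpr ((PySem.Set.mem_ofList chars k).mp hk))
  have hperm : (ys.map Prod.fst).Perm (PySem.Set.ofList chars) :=
    (List.perm_ext_iff_of_nodup hnd (PySem.Set.nodup_ofList chars)).mpr hmem
  have hys_eq : ys.map (fun p => f p.1) = ys := by
    have : ∀ p ∈ ys, f p.1 = p := by
      intro p hp
      obtain ⟨h1, h2⟩ := pvRuns_mem s hs p hp
      show (p.1, (chars.count p.1 : Int)) = p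
      rw [← hcnt p.1, ← h2]
    rw [List.map_congr_left this, List.map_id']
  have hpermPairs : ys.Perm ((PySem.Set.ofList chars).map f) := by
    have := hperm.map f
    rw [List.map_map] at this
    exact hys_eq ▸ this
  exact PySem.List.sorted_eq_of_perm_of_pairwise_lt _ _ _ hpermPairs (pvRuns_pairwise s hs)
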